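-- pv_equiv track=rewrite | github.com/kavenk/DSA | practice/string_subsequence.py | reverse_only_words
-- ===== SOURCE A (Python) =====
-- def reverse_only_words(s: str)-> str:
--     letters = [c for c in s if c.isalpha()]
--     new_s = ""
--     for c in s:
--         if c.isalpha():
--             new_s += letters.pop()
--         else:
--             new_s += c
--     return new_s
-- ===== SOURCE B (Python) =====
-- def reverse_only_words(s: str) -> str:
--     arr = list(s)
--     i, j = 0, len(arr) - 1
--     while i < j:
--         if not arr[i].isalpha():
--             i += 1
--         elif not arr[j].isalpha():
--             j -= 1
--         else:
--             arr[i], arr[j] = arr[j], arr[i]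
--             i += 1
--             j -= 1
--     return ''.join(arr)
-- ===== Notes on version B (the rewrite author's own statement) =====
-- stated objective: alternative
-- what changed: Replaces the extract-letters-then-pop-from-a-stack pass by an in-place two-pointer algorithm that swaps letter pairs while skipping non-letters from either end.
import Mathlib
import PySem

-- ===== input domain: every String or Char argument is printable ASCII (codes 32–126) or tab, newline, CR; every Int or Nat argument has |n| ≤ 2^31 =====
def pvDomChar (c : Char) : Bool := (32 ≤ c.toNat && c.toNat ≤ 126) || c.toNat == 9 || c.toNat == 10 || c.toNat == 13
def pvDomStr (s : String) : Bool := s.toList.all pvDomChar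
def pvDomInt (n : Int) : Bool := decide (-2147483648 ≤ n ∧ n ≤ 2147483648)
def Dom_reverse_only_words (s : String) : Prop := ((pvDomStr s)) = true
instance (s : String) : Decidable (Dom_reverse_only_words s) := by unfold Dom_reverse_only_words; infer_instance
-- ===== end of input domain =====

-- B replaces A's extract-letters-then-pop stack pass by an in-place two-pointer swap over
-- the character list; proved to return the same string.


-- ===== PORT A =====
-- letters = [c for c in s if c.isalpha()]; then for each c: alpha → new_s += letters.pop(), else new_s += c.
-- letters.pop() is PySem.List.pop? at -1; its none branch is unreachable (Python never raises here:
-- the number of pops equals the number of letters).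
def reverse_only_words (s : String) : String :=
  let letters := s.toList.filter PySem.Chars.isalpha
  let res := s.toList.foldl
    (fun (st : List Char × List Char) c =>
      if PySem.Chars.isalpha c then
        match PySem.List.pop? st.1 (-1) with
        | some (x, rest) => (rest, st.2 ++ [x])
        | none => (st.1, st.2)          -- dead branch (IndexError in Python, never reached)
      else (st.1, st.2 ++ [c]))
    (letters, [])
  String.mk res.2

-- ===== PORT B =====
-- the while loop of Source B: two converging pointers, swapping letters in place.
-- arr[i] / arr[j] are in range at every reachable call (0 ≤ i < j < len), so pyGetD/pySetD are exact.
def pvTpLoop (arr : List Char) (i j : Int) : List Char :=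
  if i < j then
    let ci := PySem.List.pyGetD arr i ' '
    let cj := PySem.List.pyGetD arr j ' '
    if ¬ PySem.Chars.isalpha ci then pvTpLoop arr (i + 1) j
    else if ¬ PySem.Chars.isalpha cj then pvTpLoop arr i (j - 1)
    else pvTpLoop (PySem.List.pySetD (PySem.List.pySetD arr i cj) j ci) (i + 1) (j - 1)
  else arr
termination_by (j - i).toNat
decreasing_by all_goals omega

def reverse_only_words_alt (s : String) : String :=
  let arr := s.toList
  String.mk (pvTpLoop arr 0 ((arr.length : Int) - 1))

-- ===== PRECONDITION & SPEC =====
def Spec_reverse_only_words (s : String) (out : String) : Prop := out = reverse_only_words_alt s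
instance (s : String) (out : String) : Decidable (Spec_reverse_only_words s out) := by unfold Spec_reverse_only_words; infer_instance

-- ===== CLAIM (what is proved, stated in full; the proofs are below) =====
def Claim_equal_reverse_only_words : Prop := ∀ (s : String), Dom_reverse_only_words s → Spec_reverse_only_words s (reverse_only_words s)

-- ===== LEMMAS AND PROOFS =====

-- number of letters in xs
def pvCnt (xs : List Char) : Nat := (xs.filter PySem.Chars.isalpha).length

-- interleave: replace the letters of xs, in order, by the elements of ls
def pvSRev : List Char → List Char → List Char
  | [], _ => []
  | c :: cs, ls =>
    if PySem.Chars.isalpha c then ls.headD c :: pvSRev cs ls.tail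
    else c :: pvSRev cs ls

-- the common characterisation of both programs
def pvSp2 (xs : List Char) : List Char := pvSRev xs (xs.filter PySem.Chars.isalpha).reverse

theorem pvSRev_append (xs ys ls : List Char) :
    pvSRev (xs ++ ys) ls = pvSRev xs ls ++ pvSRev ys (ls.drop (pvCnt xs)) := by
  induction xs generalizing ls with
  | nil => simp [pvSRev, pvCnt]
  | cons c cs ih =>
    by_cases h : PySem.Chars.isalpha c
    · simp [pvSRev, h, ih, pvCnt, List.drop_tail]
    · simp [pvSRev, h, ih, pvCnt]

theorem pvSRev_extra (xs ls extra : List Char) (h : pvCnt xs ≤ ls.length) :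
    pvSRev xs (ls ++ extra) = pvSRev xs ls := by
  induction xs generalizing ls with
  | nil => simp [pvSRev]
  | cons c cs ih =>
    by_cases hc : PySem.Chars.isalpha c
    · cases ls with
      | nil => simp [pvCnt, hc] at h
      | cons l lt =>
        simp only [pvSRev, hc, if_pos, List.cons_append, List.headD_cons, List.tail_cons]
        rw [ih lt (by simpa [pvCnt, hc] using h)]
    · simp only [pvSRev, hc, Bool.false_eq_true, if_false]
      rw [ih ls (by simpa [pvCnt, hc] using h)]

theorem pvSp2_cons_notalpha (c : Char) (cs : List Char) (h : ¬ PySem.Chars.isalpha c) :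
    pvSp2 (c :: cs) = c :: pvSp2 cs := by
  simp [pvSp2, pvSRev, h]

theorem pvSp2_snoc_notalpha (xs : List Char) (b : Char) (h : ¬ PySem.Chars.isalpha b) :
    pvSp2 (xs ++ [b]) = pvSp2 xs ++ [b] := by
  have hfil : (xs ++ [b]).filter PySem.Chars.isalpha = xs.filter PySem.Chars.isalpha := by
    simp [List.filter_append, List.filter_singleton, h]
  have hdrop : ((xs.filter PySem.Chars.isalpha).reverse).drop (pvCnt xs) = [] := by
    apply List.drop_eq_nil_of_le
    simp [pvCnt]
  simp only [pvSp2, hfil, pvSRev_append, hdrop]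
  simp [pvSRev, h]

theorem pvSp2_swap (a b : Char) (mid : List Char)
    (ha : PySem.Chars.isalpha a) (hb : PySem.Chars.isalpha b) :
    pvSp2 (a :: mid ++ [b]) = b :: pvSp2 mid ++ [a] := by
  set L := (mid.filter PySem.Chars.isalpha).reverse with hLdef
  have hL : L.length = pvCnt mid := by simp [hLdef, pvCnt]
  have hfil : ((a :: mid) ++ [b]).filter PySem.Chars.isalpha
      = (a :: mid.filter PySem.Chars.isalpha) ++ [b] := by
    simp [ha, hb, List.filter_cons, List.filter_append, List.filter_singleton]
  unfold pvSp2
  rw [hfil]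
  have hrev : ((a :: mid.filter PySem.Chars.isalpha) ++ [b]).reverse = b :: (L ++ [a]) := by
    simp [hLdef]
  rw [hrev, show (a :: mid) ++ [b] = a :: (mid ++ [b]) from rfl]
  simp only [pvSRev, ha, if_pos, List.headD_cons, List.tail_cons]
  rw [pvSRev_append, pvSRev_extra mid L [a] (le_of_eq hL.symm),
    show (L ++ [a]).drop (pvCnt mid) = [a] from by rw [← hL, List.drop_left]]
  simp [pvSRev, hb, hLdef]

-- A's fold: with remaining stack (ls.reverse) and as many letters left as ls holds,
-- the loop appends pvSRev cs ls.
theorem pvA_loop (cs : List Char) : ∀ (ls acc : List Char), pvCnt cs = ls.length →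
    (cs.foldl (fun (st : List Char × List Char) c =>
      if PySem.Chars.isalpha c then
        match PySem.List.pop? st.1 (-1) with
        | some (x, rest) => (rest, st.2 ++ [x])
        | none => (st.1, st.2)
      else (st.1, st.2 ++ [c])) (ls.reverse, acc)).2 = acc ++ pvSRev cs ls := by
  induction cs with
  | nil => intro ls acc _; simp [pvSRev]
  | cons c cs ih =>
    intro ls acc h
    by_cases hc : PySem.Chars.isalpha c
    · cases ls with
      | nil => simp [pvCnt, List.filter_cons, hc] at h
      | cons l lt =>
        simp only [List.foldl_cons, hc, if_pos, List.reverse_cons, PySem.List.pop?_last]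
        rw [ih lt (acc ++ [l]) (by simpa [pvCnt, List.filter_cons, hc] using h)]
        simp [pvSRev, hc]
    · simp only [List.foldl_cons, hc, Bool.false_eq_true, if_false]
      rw [ih ls (acc ++ [c]) (by simpa [pvCnt, List.filter_cons, hc] using h)]
      simp [pvSRev, hc]

theorem pvA_eq (s : String) : reverse_only_words s = String.mk (pvSp2 s.toList) := by
  unfold reverse_only_words
  have h := pvA_loop s.toList (s.toList.filter PySem.Chars.isalpha).reverse []
    (by simp [pvCnt])
  simp only [List.reverse_reverse] at h
  simp only [pvSp2]
  rw [h]
  simp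

theorem pvTp_decomp : ∀ (n : Nat) (seg pre post : List Char), seg.length = n →
    pvTpLoop (pre ++ seg ++ post) (pre.length : Int) ((pre.length : Int) + seg.length - 1)
      = pre ++ pvSp2 seg ++ post := by
  intro n
  induction n using Nat.strong_induction_on with
  | _ n IH =>
    intro seg pre post hlen
    by_cases hn : n < 2
    · rw [pvTpLoop, if_neg (by push_cast; omega)]
      congr 1
      cases seg with
      | nil => simp [pvSp2, pvSRev]
      | cons c cs =>
        cases cs with
        | nil =>
          by_cases hc : PySem.Chars.isalpha c <;>
            simp [pvSp2, pvSRev, List.filter_singleton, hc]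
        | cons d ds => simp at hlen; omega
    · push_neg at hn
      obtain ⟨a, rest, rfl⟩ : ∃ a rest, seg = a :: rest := by
        cases seg with
        | nil => simp at hlen; omega
        | cons a rest => exact ⟨a, rest, rfl⟩
      obtain ⟨mid, b, rfl⟩ : ∃ mid b, rest = mid ++ [b] := by
        rcases List.eq_nil_or_concat rest with h | ⟨mid, b, h⟩
        · subst h; simp at hlen; omega
        · exact ⟨mid, b, by simpa using h⟩
      have hm : mid.length + 2 = n := by simp at hlen; omega
      have hlen2 : (a :: (mid ++ [b])).length = mid.length + 2 := by simp
      have hidx : (pre.length : Int) + ((a :: (mid ++ [b])).length : Int) - 1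
          = (((pre ++ a :: mid).length : Nat) : Int) := by
        simp only [hlen2, List.length_append, List.length_cons]
        push_cast; omega
      have harr : pre ++ (a :: (mid ++ [b])) ++ post = (pre ++ a :: mid) ++ (b :: post) := by
        simp
      have hci : PySem.List.pyGetD (pre ++ (a :: (mid ++ [b])) ++ post) (pre.length : Int) ' ' = a := by
        rw [PySem.List.pyGetD_natCast, List.getD_eq_getElem?_getD,
          show pre ++ (a :: (mid ++ [b])) ++ post = pre ++ (a :: (mid ++ b :: post)) from by simp,
          List.getElem?_append_right (le_refl _)]
        simp
      have hcj : PySem.List.pyGetD (pre ++ (a :: (mid ++ [b])) ++ post)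
          ((pre.length : Int) + ((a :: (mid ++ [b])).length : Int) - 1) ' ' = b := by
        rw [hidx, PySem.List.pyGetD_natCast, List.getD_eq_getElem?_getD, harr,
          List.getElem?_append_right (le_refl _)]
        simp
      rw [pvTpLoop]
      rw [if_pos (by simp only [hlen2]; push_cast; omega)]
      simp only [hci, hcj]
      by_cases hA : PySem.Chars.isalpha a
      · by_cases hB : PySem.Chars.isalpha b
        · -- both letters: swap and recurse on the interior
          rw [if_neg (by simp [hA]), if_neg (by simp [hB])]
          have hswap : PySem.List.pySetD
              (PySem.List.pySetD (pre ++ (a :: (mid ++ [b])) ++ post) ((pre.length : Nat) : Int) b)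
              ((pre.length : Int) + ((a :: (mid ++ [b])).length : Int) - 1) a
              = (pre ++ [b]) ++ mid ++ ([a] ++ post) := by
            rw [hidx, PySem.List.pySetD_natCast, PySem.List.pySetD_natCast]
            rw [show pre ++ (a :: (mid ++ [b])) ++ post = pre ++ (a :: (mid ++ b :: post)) from by simp]
            simp
          push_cast at hswap
          rw [hswap]
          have h2 := IH (mid.length) (by omega) mid (pre ++ [b]) ([a] ++ post) rfl
          have e1 : (((pre ++ [b]).length : Nat) : Int) = (pre.length : Int) + 1 := by
            simp
          rw [e1] at h2
          have e2 : (pre.length : Int) + 1 + (mid.length : Int) - 1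
              = (pre.length : Int) + ((a :: (mid ++ [b])).length : Int) - 1 - 1 := by
            simp [hlen2]; push_cast; omega
          rw [e2] at h2
          rw [h2, show (a :: (mid ++ [b])) = a :: mid ++ [b] from rfl, pvSp2_swap a b mid hA hB]
          simp
        · -- right end not a letter: shrink j
          rw [if_neg (by simp [hA]), if_pos (by simp [hB])]
          have h2 := IH (mid.length + 1) (by omega) (a :: mid) pre ((b :: post)) (by simp)
          have e2 : (pre.length : Int) + ((a :: mid).length : Int) - 1
              = (pre.length : Int) + ((a :: (mid ++ [b])).length : Int) - 1 - 1 := by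
            simp [hlen2]; push_cast; omega
          rw [e2, show pre ++ (a :: mid) ++ (b :: post) = pre ++ (a :: (mid ++ [b])) ++ post from by simp]
            at h2
          rw [h2, show (a :: (mid ++ [b])) = (a :: mid) ++ [b] from rfl, pvSp2_snoc_notalpha (a :: mid) b (by simpa using hB)]
          simp
      · -- left end not a letter: advance i
        rw [if_pos (by simp [hA])]
        have h2 := IH (mid.length + 1) (by omega) (mid ++ [b]) (pre ++ [a]) post (by simp)
        have e1 : (((pre ++ [a]).length : Nat) : Int) = (pre.length : Int) + 1 := by simp
        have e2 : (pre.length : Int) + 1 + ((mid ++ [b]).length : Int) - 1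
            = (pre.length : Int) + ((a :: (mid ++ [b])).length : Int) - 1 := by
          simp [hlen2]; push_cast; omega
        rw [e1, e2, show (pre ++ [a]) ++ (mid ++ [b]) ++ post = pre ++ (a :: (mid ++ [b])) ++ post
          from by simp] at h2
        rw [h2, pvSp2_cons_notalpha a (mid ++ [b]) (by simpa using hA)]
        simp

theorem pvB_eq (s : String) : reverse_only_words_alt s = String.mk (pvSp2 s.toList) := by
  have h := pvTp_decomp s.toList.length s.toList [] [] rfl
  simp only [List.nil_append, List.append_nil, List.length_nil, Nat.cast_zero, zero_add] at h
  show String.mk (pvTpLoop s.toList 0 ((s.toList.length : Int) - 1)) = _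
  rw [h]

-- ===== VERDICT (by name: the statement is the Claim_ definition above) =====
theorem reverse_only_words_spec : Claim_equal_reverse_only_words := by
  intro s _
  unfold Spec_reverse_only_words
  rw [pvA_eq, pvB_eq]
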